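-- pv_equiv track=rewrite | github.com/FrancescoLazzarotto/graphRAG-pipeline | scripts/evaluate_matrix_quality.py | _find_phrase_positions
-- ===== SOURCE A (Python) =====
-- def _find_phrase_positions(tokens: list[str], phrase_tokens: list[str]) -> list[int]:
--     if not phrase_tokens:
--         return []
--
--     positions: list[int] = []
--     window = len(phrase_tokens)
--     for index in range(0, len(tokens) - window + 1):
--         if tokens[index : index + window] == phrase_tokens:
--             positions.append(index)
--     return positions
-- ===== SOURCE B (Python) =====
-- def _find_phrase_positions(tokens: list[str], phrase_tokens: list[str]) -> list[int]:
--     if not phrase_tokens: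
--         return []
--     candidates = list(range(len(tokens) - len(phrase_tokens) + 1))
--     for j, tok in enumerate(phrase_tokens):
--         candidates = [i for i in candidates if tokens[i + j] == tok]
--     return candidates
-- ===== Notes on version B (the rewrite author's own statement) =====
-- stated objective: alternative
-- what changed: Transposed the loops: instead of comparing a slice at every start position, B keeps a list of candidate start positions and filters it once per phrase token, so the inner slice comparison disappears.
import Mathlib
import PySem

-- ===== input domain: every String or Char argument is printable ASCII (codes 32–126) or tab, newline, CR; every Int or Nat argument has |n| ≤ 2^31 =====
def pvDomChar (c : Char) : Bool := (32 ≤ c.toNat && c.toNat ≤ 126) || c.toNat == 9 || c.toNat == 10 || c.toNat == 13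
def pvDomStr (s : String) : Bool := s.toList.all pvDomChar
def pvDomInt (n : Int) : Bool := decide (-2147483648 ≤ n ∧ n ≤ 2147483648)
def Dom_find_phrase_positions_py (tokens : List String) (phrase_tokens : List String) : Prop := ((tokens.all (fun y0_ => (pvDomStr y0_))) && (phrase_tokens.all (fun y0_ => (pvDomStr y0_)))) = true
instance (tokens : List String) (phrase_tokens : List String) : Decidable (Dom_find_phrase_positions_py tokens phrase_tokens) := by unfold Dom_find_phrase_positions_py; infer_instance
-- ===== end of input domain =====

-- B transposes the loops: it filters a list of candidate start positions once per phrase token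
-- instead of comparing a full slice at each start; an alternative algorithm of the same worst-case cost.


-- ===== PORT A =====
def find_phrase_positions_py (tokens : List String) (phrase_tokens : List String) : List Int :=
  if phrase_tokens = [] then []
  else
    let window : Int := phrase_tokens.length
    (PySem.List.pyRange 0 ((tokens.length : Int) - window + 1) 1).foldl
      (fun positions index =>
        if PySem.List.slice tokens (some index) (some (index + window)) = phrase_tokens
        then positions ++ [index] else positions) []

-- ===== PORT B =====
def find_phrase_positions_py_alt (tokens : List String) (phrase_tokens : List String) : List Int :=
  if phrase_tokens = [] then []
  else
    (PySem.List.enumerate phrase_tokens 0).foldl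
      (fun cands jt => cands.filter (fun i => PySem.List.pyGet? tokens (i + jt.1) == some jt.2))
      (PySem.List.pyRange 0 ((tokens.length : Int) - (phrase_tokens.length : Int) + 1) 1)

-- ===== PRECONDITION & SPEC =====
def Spec_find_phrase_positions_py (tokens : List String) (phrase_tokens : List String) (out : List Int) : Prop := out = find_phrase_positions_py_alt tokens phrase_tokens
instance (tokens : List String) (phrase_tokens : List String) (out : List Int) : Decidable (Spec_find_phrase_positions_py tokens phrase_tokens out) := by unfold Spec_find_phrase_positions_py; infer_instance

-- ===== CLAIM (what is proved, stated in full; the proofs are below) =====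
def Claim_equal_find_phrase_positions_py : Prop := ∀ (tokens : List String) (phrase_tokens : List String), Dom_find_phrase_positions_py tokens phrase_tokens → Spec_find_phrase_positions_py tokens phrase_tokens (find_phrase_positions_py tokens phrase_tokens)

-- ===== LEMMAS AND PROOFS =====

-- Folding per-token filters equals one filter by the conjunction of all the tests.
theorem foldl_filter_eq_filter_all {α β : Type} (p : β → α → Bool) :
    ∀ (ps : List β) (init : List α),
      ps.foldl (fun c b => c.filter (p b)) init
        = init.filter (fun a => ps.all (fun b => p b a)) := by
  intro ps
  induction ps with
  | nil => intro init; simp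
  | cons hd tl ih =>
    intro init
    simp [List.foldl_cons, ih, List.filter_filter, Bool.and_comm]

-- The conjunction of the per-token tests equals the slice comparison (as a Bool), shifted form.
theorem all_enumerate_eq_decide_take (xs : List String) :
    ∀ (ph : List String) (a s : Nat), a + s + ph.length ≤ xs.length →
      ((PySem.List.enumerate ph ((s : Nat) : Int)).all
          (fun jt => PySem.List.pyGet? xs (((a : Nat) : Int) + jt.1) == some jt.2))
        = decide ((xs.drop (a + s)).take ph.length = ph) := by
  intro ph
  induction ph with
  | nil => intro a s _; simp
  | cons h t ih =>
    intro a s hle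
    have hlt : a + s < xs.length := by simp at hle; omega
    rw [PySem.List.enumerate_cons]
    have hidx : ((a : Nat) : Int) + ((s : Nat) : Int) = (((a + s : Nat)) : Int) := by push_cast; ring
    have hdrop : xs.drop (a + s) = xs[a + s] :: xs.drop (a + s + 1) :=
      List.drop_eq_getElem_cons hlt
    have hih := ih a (s + 1) (by simp at hle ⊢; omega)
    have hs1 : ((s : Nat) : Int) + 1 = (((s + 1 : Nat)) : Int) := by push_cast; ring
    simp only [List.all_cons, hidx, hs1, hih]
    rw [hdrop]
    have hget : PySem.List.pyGet? xs (((a + s : Nat)) : Int) = some xs[a + s] := by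
      rw [PySem.List.pyGet?_natCast]
      simp [List.getElem?_eq_getElem hlt]
    simp only [hget, List.take_succ_cons, List.length_cons]
    have : a + (s + 1) = a + s + 1 := by omega
    rw [this]
    by_cases h1 : xs[a + s] = h <;> by_cases h2 : (xs.drop (a + s + 1)).take t.length = t <;>
      simp [h1, h2]

-- ===== VERDICT (by name: the statement is the Claim_ definition above) =====
theorem find_phrase_positions_py_spec : Claim_equal_find_phrase_positions_py := by
  intro tokens phrase_tokens _
  unfold Spec_find_phrase_positions_py find_phrase_positions_py find_phrase_positions_py_alt
  by_cases hph : phrase_tokens = []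
  · simp [hph]
  · simp only [hph, reduceIte]
    rw [PySem.List.foldl_append_ite_eq_filter, foldl_filter_eq_filter_all]
    simp only [List.nil_append]
    apply List.filter_congr
    intro i hi
    rw [PySem.List.mem_pyRange_one] at hi
    obtain ⟨hi0, hiub⟩ := hi
    have ha : i = ((i.toNat : Nat) : Int) := by omega
    have hm : (i.toNat : Nat) + 0 + phrase_tokens.length ≤ tokens.length := by omega
    have hall := all_enumerate_eq_decide_take tokens phrase_tokens i.toNat 0 hm
    simp only [Nat.cast_zero, Nat.add_zero] at hall
    rw [ha, hall]
    have hslice : PySem.List.slice tokens (some ((i.toNat : Nat) : Int))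
        (some (((i.toNat : Nat) : Int) + ((phrase_tokens.length : Nat) : Int)))
        = (tokens.drop i.toNat).take phrase_tokens.length :=
      PySem.List.slice_natCast_add tokens i.toNat phrase_tokens.length
    rw [hslice]
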